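-- pv_equiv track=rewrite | github.com/RehanAfzalkhan/UC_Berkley_problems | literally1984.py | generate_visible_houses
-- ===== SOURCE A (Python) =====
-- def gcd(a, b):
--     """Compute the greatest common divisor of a and b."""
--     while b:
--         a, b = b, a % b
--     return abs(a)
--
-- def generate_visible_houses(limit):
--     """Generate all visible house coordinates sorted by Manhattan distance and x-coordinate."""
--     visible_houses = []
--     seen = set()
--
--     for x in range(1, limit + 1):
--         for y in range(1, limit + 1):
--             g = gcd(x, y)
--             reduced_x = x // g
--             reduced_y = y // g
--             if (reduced_x, reduced_y) not in seen:
--                 seen.add((reduced_x, reduced_y))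
--                 visible_houses.append(
--                     (x, y, x + y)
--                 )  # Store x, y, and Manhattan distance
--
--     visible_houses.sort(
--         key=lambda coord: (coord[2], coord[0])
--     )  # Sort by Manhattan distance, then x
--     return [(x, y) for x, y, _ in visible_houses]
-- ===== SOURCE B (Python) =====
-- def _coprime(a, b):
--     """True iff gcd(a, b) == 1, by the recursive Euclid step."""
--     return a == 1 if b == 0 else _coprime(b, a % b)
--
--
-- def generate_visible_houses(limit):
--     """Generate all visible house coordinates sorted by Manhattan distance and x-coordinate."""
--     # A visible house is exactly a coprime pair (x, y); emitting them bucket by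
--     # bucket of constant Manhattan distance s = x + y (x ascending) yields the
--     # sorted order directly, so no sort and no seen-set are needed.
--     result = []
--     for s in range(2, 2 * limit + 1):
--         for x in range(max(1, s - limit), min(limit, s - 1) + 1):
--             if _coprime(x, s - x):
--                 result.append((x, s - x))
--     return result
-- ===== Notes on version B (the rewrite author's own statement) =====
-- stated objective: alternative
-- what changed: B enumerates coprime pairs directly, bucket by bucket of constant Manhattan distance s = x + y with x ascending, which is already the required output order, so A's reduced-pair seen-set and its final sort disappear.
import Mathlib
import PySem

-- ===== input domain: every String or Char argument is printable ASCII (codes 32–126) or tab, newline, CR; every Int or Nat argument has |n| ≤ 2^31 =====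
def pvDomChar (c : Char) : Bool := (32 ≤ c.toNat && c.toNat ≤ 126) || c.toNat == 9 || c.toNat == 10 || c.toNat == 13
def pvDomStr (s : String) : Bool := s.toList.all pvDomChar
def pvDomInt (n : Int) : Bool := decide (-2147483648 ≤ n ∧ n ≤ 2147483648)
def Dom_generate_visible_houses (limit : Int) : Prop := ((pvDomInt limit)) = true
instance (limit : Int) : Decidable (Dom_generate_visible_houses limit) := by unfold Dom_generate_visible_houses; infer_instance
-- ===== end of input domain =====

-- B emits the coprime pairs bucket by bucket of constant Manhattan distance (x ascending inside a
-- bucket), which is already the required order, so A's seen-set and final sort disappear.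

-- termination measure for Euclid's step (used by both ports' gcd helpers)
theorem pvModAbsLt (a b : Int) (hb : ¬ b = 0) : (PySem.Int.mod a b).natAbs < b.natAbs := by
  rcases lt_or_gt_of_ne hb with h | h
  · have := PySem.Int.mod_neg_bounds a h
    omega
  · have h1 := PySem.Int.mod_nonneg a h
    have h2 := PySem.Int.mod_lt a h
    omega

-- ===== PORT A =====
-- while b: a, b = b, a % b; return abs(a)
def gcd_loop (a b : Int) : Int :=
  if h : b = 0 then |a| else gcd_loop b (PySem.Int.mod a b)
termination_by b.natAbs
decreasing_by exact pvModAbsLt a b h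

def generate_visible_houses (limit : Int) : List (Int × Int) :=
  let st :=
    (PySem.List.pyRange 1 (limit + 1) 1).foldl (fun st x =>
      (PySem.List.pyRange 1 (limit + 1) 1).foldl (fun st y =>
        let g := gcd_loop x y
        let reduced_x := PySem.Int.floordiv x g
        let reduced_y := PySem.Int.floordiv y g
        if PySem.Set.contains st.2 (reduced_x, reduced_y) then st
        else (st.1 ++ [(x, y, x + y)], PySem.Set.add st.2 (reduced_x, reduced_y))) st)
      (([] : List (Int × Int × Int)), (PySem.Set.empty : PySem.Set (Int × Int)))
  (PySem.List.sorted2 st.1 (fun c => c.2.2) (fun c => c.1)).map (fun c => (c.1, c.2.1))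

-- ===== PORT B =====
-- return a == 1 if b == 0 else _coprime(b, a % b)
def coprime_rec (a b : Int) : Bool :=
  if h : b = 0 then a == 1 else coprime_rec b (PySem.Int.mod a b)
termination_by b.natAbs
decreasing_by exact pvModAbsLt a b h

def generate_visible_houses_alt (limit : Int) : List (Int × Int) :=
  (PySem.List.pyRange 2 (2 * limit + 1) 1).foldl (fun result s =>
    (PySem.List.pyRange (max 1 (s - limit)) (min limit (s - 1) + 1) 1).foldl (fun result x =>
      if coprime_rec x (s - x) then result ++ [(x, s - x)] else result) result) []

-- ===== PRECONDITION & SPEC =====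
def Spec_generate_visible_houses (limit : Int) (out : List (Int × Int)) : Prop := out = generate_visible_houses_alt limit
instance (limit : Int) (out : List (Int × Int)) : Decidable (Spec_generate_visible_houses limit out) := by unfold Spec_generate_visible_houses; infer_instance

-- ===== CLAIM (what is proved, stated in full; the proofs are below) =====
def Claim_equal_generate_visible_houses : Prop := ∀ (limit : Int), Dom_generate_visible_houses limit → Spec_generate_visible_houses limit (generate_visible_houses limit)

-- ===== LEMMAS AND PROOFS =====

-- one Euclid step keeps the gcd
theorem gcd_mod_step (a b : Int) : Int.gcd b (PySem.Int.mod a b) = Int.gcd a b := by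
  have hm := PySem.Int.floordiv_mul_add_mod a b
  have h2 : PySem.Int.mod a b = a + b * (-(PySem.Int.floordiv a b)) := by linarith
  rw [h2, Int.gcd_add_mul_left_right, Int.gcd_comm]

theorem gcdLoop_eq (a b : Int) : gcd_loop a b = (Int.gcd a b : Int) := by
  by_cases h : b = 0
  · subst h
    rw [gcd_loop, Int.abs_eq_natAbs a, Int.gcd_zero_right]
    simp
  · rw [gcd_loop]
    simp only [dif_neg h]
    rw [gcdLoop_eq b (PySem.Int.mod a b), gcd_mod_step]
termination_by b.natAbs
decreasing_by exact pvModAbsLt a b h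

-- coprime_rec decides coprimality on nonnegative inputs
theorem coprimeRec_iff (b a : Int) (hb : 0 ≤ b) (ha : 0 ≤ a) :
    coprime_rec a b = true ↔ Int.gcd a b = 1 := by
  by_cases h : b = 0
  · subst h
    rw [coprime_rec]
    simp
    omega
  · rw [coprime_rec]
    simp only [dif_neg h]
    have hbpos : 0 < b := lt_of_le_of_ne hb (Ne.symm h)
    rw [coprimeRec_iff (PySem.Int.mod a b) b (PySem.Int.mod_nonneg a hbpos) hb, gcd_mod_step]
termination_by b.natAbs
decreasing_by exact pvModAbsLt a b h

-- the loop bodies of port A, named so the folds can be reasoned about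
def fA (x : Int) (st : List (Int × Int × Int) × PySem.Set (Int × Int)) (y : Int) :
    List (Int × Int × Int) × PySem.Set (Int × Int) :=
  if PySem.Set.contains st.2 (PySem.Int.floordiv x (gcd_loop x y), PySem.Int.floordiv y (gcd_loop x y)) then st
  else (st.1 ++ [(x, y, x + y)],
        PySem.Set.add st.2 (PySem.Int.floordiv x (gcd_loop x y), PySem.Int.floordiv y (gcd_loop x y)))

def gA (limit : Int) (st : List (Int × Int × Int) × PySem.Set (Int × Int)) (x : Int) :
    List (Int × Int × Int) × PySem.Set (Int × Int) :=
  (PySem.List.pyRange 1 (limit + 1) 1).foldl (fA x) st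

-- row x of A's accumulator, up to (exclusive) column y
def rowA (x y : Int) : List (Int × Int × Int) :=
  ((PySem.List.pyRange 1 y 1).filter (fun b => decide (gcd_loop x b = 1))).map (fun b => (x, b, x + b))

-- A's accumulator when the loop stands at position (x, y)
def vhA (limit x y : Int) : List (Int × Int × Int) :=
  ((PySem.List.pyRange 1 x 1).flatMap (fun a => rowA a (limit + 1))) ++ rowA x y

-- the pairs processed strictly before position (x, y) of the double loop
def BeforeP (limit x y : Int) (p : Int × Int) : Prop :=
  1 ≤ p.1 ∧ p.1 ≤ limit ∧ 1 ≤ p.2 ∧ p.2 ≤ limit ∧ (p.1 < x ∨ (p.1 = x ∧ p.2 < y))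

def InvA (limit x y : Int) (st : List (Int × Int × Int) × PySem.Set (Int × Int)) : Prop :=
  st.1 = vhA limit x y ∧
  ∀ p : Int × Int, PySem.Set.contains st.2 p = true ↔ BeforeP limit x y p ∧ gcd_loop p.1 p.2 = 1

-- facts about the reduced pair
theorem reduce_facts (x y : Int) (hx : 1 ≤ x) (hy : 1 ≤ y) :
    1 ≤ PySem.Int.floordiv x (gcd_loop x y) ∧ PySem.Int.floordiv x (gcd_loop x y) ≤ x ∧
    1 ≤ PySem.Int.floordiv y (gcd_loop x y) ∧ PySem.Int.floordiv y (gcd_loop x y) ≤ y ∧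
    gcd_loop (PySem.Int.floordiv x (gcd_loop x y)) (PySem.Int.floordiv y (gcd_loop x y)) = 1 ∧
    (gcd_loop x y = 1 ↔ PySem.Int.floordiv x (gcd_loop x y) = x ∧ PySem.Int.floordiv y (gcd_loop x y) = y) ∧
    (gcd_loop x y ≠ 1 → PySem.Int.floordiv x (gcd_loop x y) < x) := by
  have hg := gcdLoop_eq x y
  have hgpos : 0 < Int.gcd x y := Int.gcd_pos_of_ne_zero_left y (by omega)
  have hgz : (0 : Int) < (Int.gcd x y : Int) := by exact_mod_cast hgpos
  have hfx : PySem.Int.floordiv x (gcd_loop x y) = x / (Int.gcd x y : Int) := by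
    rw [hg]; exact PySem.Int.floordiv_eq_ediv_of_pos hgz
  have hfy : PySem.Int.floordiv y (gcd_loop x y) = y / (Int.gcd x y : Int) := by
    rw [hg]; exact PySem.Int.floordiv_eq_ediv_of_pos hgz
  have hdx : (Int.gcd x y : Int) ∣ x := Int.gcd_dvd_left x y
  have hdy : (Int.gcd x y : Int) ∣ y := Int.gcd_dvd_right x y
  have hex : (Int.gcd x y : Int) * (x / (Int.gcd x y : Int)) = x := Int.mul_ediv_cancel' hdx
  have hey : (Int.gcd x y : Int) * (y / (Int.gcd x y : Int)) = y := Int.mul_ediv_cancel' hdy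
  set g : Int := (Int.gcd x y : Int) with hgdef
  set rx : Int := x / g with hrxdef
  set ry : Int := y / g with hrydef
  have hrx1 : 1 ≤ rx := by nlinarith
  have hrxx : rx ≤ x := by nlinarith
  have hry1 : 1 ≤ ry := by nlinarith
  have hryy : ry ≤ y := by nlinarith
  have hco : gcd_loop rx ry = 1 := by
    rw [gcdLoop_eq]
    have h5 := Int.gcd_div_gcd_div_gcd (i := x) (j := y) hgpos
    rw [hrxdef, hrydef, hgdef]
    rw [h5]
    norm_num
  rw [hfx, hfy, hg]
  refine ⟨hrx1, hrxx, hry1, hryy, hco, ⟨?_, ?_⟩, ?_⟩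
  · intro h1; constructor <;> nlinarith
  · rintro ⟨h1, h2⟩; nlinarith
  · intro hne
    have h6 : 2 ≤ g := by
      have : g ≠ 1 := hne
      omega
    nlinarith

theorem innerStep (limit x y : Int) (st : List (Int × Int × Int) × PySem.Set (Int × Int))
    (hx1 : 1 ≤ x) (hx2 : x ≤ limit) (hy1 : 1 ≤ y) (hy2 : y ≤ limit)
    (hinv : InvA limit x y st) : InvA limit x (y + 1) (fA x st y) := by
  obtain ⟨hl, hs⟩ := hinv
  obtain ⟨h1, h2, h3, h4, hco, hiff, hlt⟩ := reduce_facts x y hx1 hy1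
  by_cases hg1 : gcd_loop x y = 1
  · obtain ⟨hxx, hyy⟩ := hiff.mp hg1
    have hcont : PySem.Set.contains st.2
        (PySem.Int.floordiv x (gcd_loop x y), PySem.Int.floordiv y (gcd_loop x y)) = false := by
      rw [← Bool.not_eq_true, hs]
      rintro ⟨hb, -⟩
      unfold BeforeP at hb
      rw [hxx, hyy] at hb
      simp only at hb
      omega
    unfold fA
    rw [hcont]
    simp only [Bool.false_eq_true, if_false]
    constructor
    · show st.1 ++ [(x, y, x + y)] = vhA limit x (y + 1)
      rw [hl]
      unfold vhA rowA
      rw [PySem.List.pyRange_one_succ_right (by omega : (1:Int) ≤ y),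
          List.filter_append, List.map_append, ← List.append_assoc]
      simp [hg1]
    · intro p
      obtain ⟨p1, p2⟩ := p
      rw [hxx, hyy]
      show PySem.Set.contains (PySem.Set.add st.2 (x, y)) (p1, p2) = true ↔ _
      rw [PySem.Set.contains_iff, PySem.Set.mem_add, ← PySem.Set.contains_iff, hs]
      unfold BeforeP
      simp only [Prod.mk.injEq]
      constructor
      · rintro (⟨hb, hcop⟩ | ⟨he1, he2⟩)
        · exact ⟨by omega, hcop⟩
        · subst he1; subst he2
          exact ⟨by omega, hg1⟩
      · rintro ⟨hb, hcop⟩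
        by_cases hpe : p1 = x ∧ p2 = y
        · exact Or.inr hpe
        · exact Or.inl ⟨by omega, hcop⟩
  · have hbef : BeforeP limit x y
        (PySem.Int.floordiv x (gcd_loop x y), PySem.Int.floordiv y (gcd_loop x y)) := by
      unfold BeforeP
      simp only
      refine ⟨h1, by omega, h3, by omega, Or.inl (hlt hg1)⟩
    have hcont : PySem.Set.contains st.2
        (PySem.Int.floordiv x (gcd_loop x y), PySem.Int.floordiv y (gcd_loop x y)) = true :=
      (hs _).mpr ⟨hbef, hco⟩
    unfold fA
    rw [hcont]
    simp only [if_true]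
    constructor
    · show st.1 = vhA limit x (y + 1)
      rw [hl]
      unfold vhA rowA
      rw [PySem.List.pyRange_one_succ_right (by omega : (1:Int) ≤ y),
          List.filter_append, List.map_append, ← List.append_assoc]
      simp [hg1]
    · intro p
      obtain ⟨p1, p2⟩ := p
      rw [hs]
      unfold BeforeP
      simp only
      constructor
      · rintro ⟨hb, hcop⟩
        exact ⟨by omega, hcop⟩
      · rintro ⟨hb, hcop⟩
        by_cases hpe : p1 = x ∧ p2 = y
        · exfalso
          obtain ⟨he1, he2⟩ := hpe
          subst he1; subst he2
          exact hg1 hcop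
        · exact ⟨by omega, hcop⟩

theorem innerFold (limit x : Int) (hx1 : 1 ≤ x) (hx2 : x ≤ limit) :
    ∀ (k : ℕ) (y : Int) (st : List (Int × Int × Int) × PySem.Set (Int × Int)),
      y = limit + 1 - k → 1 ≤ y → InvA limit x y st →
      InvA limit x (limit + 1) (((PySem.List.pyRange y (limit + 1) 1)).foldl (fA x) st) := by
  intro k
  induction k with
  | zero =>
    intro y st hyk hy1 hinv
    have hy : y = limit + 1 := by omega
    subst hy
    rw [PySem.List.pyRange_one_eq_nil (by omega)]
    exact hinv
  | succ k ih =>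
    intro y st hyk hy1 hinv
    rw [PySem.List.pyRange_one_cons (by omega : y < limit + 1)]
    simp only [List.foldl_cons]
    exact ih (y + 1) (fA x st y) (by omega) (by omega)
      (innerStep limit x y st hx1 hx2 hy1 (by omega) hinv)

theorem invTrans (limit x : Int) (hx : 1 ≤ x) (st : List (Int × Int × Int) × PySem.Set (Int × Int))
    (h : InvA limit x (limit + 1) st) : InvA limit (x + 1) 1 st := by
  obtain ⟨hl, hs⟩ := h
  constructor
  · rw [hl]
    unfold vhA
    rw [PySem.List.pyRange_one_succ_right (by omega : (1:Int) ≤ x), List.flatMap_append]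
    have hnil : rowA (x + 1) 1 = [] := by
      unfold rowA
      rw [PySem.List.pyRange_one_eq_nil (by omega)]
      rfl
    simp [hnil]
  · intro p
    obtain ⟨p1, p2⟩ := p
    rw [hs]
    unfold BeforeP
    simp only
    constructor
    · rintro ⟨hb, hcop⟩
      exact ⟨by omega, hcop⟩
    · rintro ⟨hb, hcop⟩
      exact ⟨by omega, hcop⟩

theorem outerFold (limit : Int) :
    ∀ (k : ℕ) (x : Int) (st : List (Int × Int × Int) × PySem.Set (Int × Int)),
      x = limit + 1 - k → 1 ≤ x → InvA limit x 1 st →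
      InvA limit (limit + 1) 1 (((PySem.List.pyRange x (limit + 1) 1)).foldl (gA limit) st) := by
  intro k
  induction k with
  | zero =>
    intro x st hxk hx1 hinv
    have hx : x = limit + 1 := by omega
    subst hx
    rw [PySem.List.pyRange_one_eq_nil (by omega)]
    exact hinv
  | succ k ih =>
    intro x st hxk hx1 hinv
    rw [PySem.List.pyRange_one_cons (by omega : x < limit + 1)]
    simp only [List.foldl_cons]
    have hxle : x ≤ limit := by omega
    have hmid : InvA limit x (limit + 1) (gA limit st x) := by
      unfold gA
      exact innerFold limit x hx1 hxle limit.toNat 1 st (by omega) (by omega) hinv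
    exact ih (x + 1) (gA limit st x) (by omega) (by omega) (invTrans limit x hx1 _ hmid)

theorem invInit (limit : Int) :
    InvA limit 1 1 (([] : List (Int × Int × Int)), (PySem.Set.empty : PySem.Set (Int × Int))) := by
  constructor
  · show ([] : List (Int × Int × Int)) = vhA limit 1 1
    unfold vhA rowA
    rw [PySem.List.pyRange_one_eq_nil (by omega : (1:Int) ≤ 1)]
    rfl
  · intro p
    obtain ⟨p1, p2⟩ := p
    rw [PySem.Set.contains_iff]
    unfold BeforeP
    simp only [PySem.Set.empty, List.not_mem_nil, false_iff, not_and]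
    intro hb
    omega

-- B's accumulated list with the distance kept as a third component
def bTriples (limit : Int) : List (Int × Int × Int) :=
  (PySem.List.pyRange 2 (2 * limit + 1) 1).flatMap (fun s =>
    ((PySem.List.pyRange (max 1 (s - limit)) (min limit (s - 1) + 1) 1).filter
      (fun x => coprime_rec x (s - x))).map (fun x => (x, s - x, s)))

theorem B_eq_map (limit : Int) :
    generate_visible_houses_alt limit = (bTriples limit).map (fun c => (c.1, c.2.1)) := by
  unfold generate_visible_houses_alt bTriples
  simp only [PySem.List.foldl_append_if, PySem.List.foldl_append_eq_flatMap,
    List.map_flatMap, List.map_map, List.nil_append]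
  rfl

-- a sorted2 call with Int keys is a sorted call with the lexicographic key
theorem sorted2_eq_sorted_lex {α : Type} (xs : List α) (k1 k2 : α → Int) :
    PySem.List.sorted2 xs k1 k2 = PySem.List.sorted xs (fun a => toLex (k1 a, k2 a)) := by
  have hb : (fun (a b : α) => decide (k1 a < k1 b) || (!decide (k1 b < k1 a) && decide (k2 a < k2 b)))
      = (fun a b => decide (toLex (k1 a, k2 a) < toLex (k1 b, k2 b))) := by
    funext a b
    by_cases h1 : k1 a < k1 b <;> by_cases h2 : k1 b < k1 a <;> by_cases h3 : k2 a < k2 b <;>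
      simp [Prod.Lex.toLex_lt_toLex, h1, h2, h3] <;> omega
  rw [PySem.List.sorted_eq_foldl_insertBy]
  show xs.foldl (fun acc x => PySem.List.insertBy
    (fun a b => decide (k1 a < k1 b) || (!decide (k1 b < k1 a) && decide (k2 a < k2 b))) x acc) [] = _
  rw [hb]

def Cond (limit : Int) (p : Int × Int × Int) : Prop :=
  1 ≤ p.1 ∧ p.1 ≤ limit ∧ 1 ≤ p.2.1 ∧ p.2.1 ≤ limit ∧ Int.gcd p.1 p.2.1 = 1 ∧ p.2.2 = p.1 + p.2.1

theorem memF (limit : Int) (p : Int × Int × Int) :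
    p ∈ vhA limit (limit + 1) 1 ↔ Cond limit p := by
  obtain ⟨a, b, c⟩ := p
  unfold vhA rowA Cond
  rw [PySem.List.pyRange_one_eq_nil (by omega : (1:Int) ≤ 1)]
  simp only [List.filter_nil, List.map_nil, List.append_nil, List.mem_flatMap, List.mem_map,
    List.mem_filter, PySem.List.mem_pyRange_one, decide_eq_true_eq]
  constructor
  · rintro ⟨u, ⟨hu1, hu2⟩, v, ⟨⟨hv1, hv2⟩, hcop⟩, heq⟩
    simp only [Prod.mk.injEq] at heq
    obtain ⟨h1, h2, h3⟩ := heq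
    rw [gcdLoop_eq] at hcop
    refine ⟨by omega, by omega, by omega, by omega, ?_, by omega⟩
    rw [← h1, ← h2]
    exact_mod_cast hcop
  · rintro ⟨ha1, ha2, hb1, hb2, hgcd, hc⟩
    refine ⟨a, ⟨ha1, by omega⟩, b, ⟨⟨hb1, by omega⟩, ?_⟩, ?_⟩
    · rw [gcdLoop_eq]; exact_mod_cast hgcd
    · have h3 : c = a + b := by omega
      rw [h3]

theorem memB (limit : Int) (p : Int × Int × Int) :
    p ∈ bTriples limit ↔ Cond limit p := by
  obtain ⟨a, b, c⟩ := p
  unfold bTriples Cond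
  simp only [List.mem_flatMap, List.mem_map, List.mem_filter, PySem.List.mem_pyRange_one]
  constructor
  · rintro ⟨s, ⟨hs1, hs2⟩, x, ⟨⟨hx1, hx2⟩, hcop⟩, heq⟩
    simp only [Prod.mk.injEq] at heq
    obtain ⟨h1, h2, h3⟩ := heq
    have hgcd := (coprimeRec_iff (s - x) x (by omega) (by omega)).mp hcop
    refine ⟨by omega, by omega, by omega, by omega, ?_, by omega⟩
    rw [← h1, ← h2]
    exact hgcd
  · rintro ⟨ha1, ha2, hb1, hb2, hgcd, hc⟩
    refine ⟨a + b, ⟨by omega, by omega⟩, a, ⟨⟨by omega, by omega⟩, ?_⟩, ?_⟩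
    · have he : a + b - a = b := by omega
      rw [he]
      exact (coprimeRec_iff b a (by omega) (by omega)).mpr hgcd
    · have h2 : a + b - a = b := by omega
      have h3 : c = a + b := by omega
      rw [h2, h3]

theorem pairwiseB (limit : Int) :
    (bTriples limit).Pairwise (fun c d => toLex (c.2.2, c.1) < toLex (d.2.2, d.1)) := by
  unfold bTriples
  rw [List.pairwise_flatMap]
  constructor
  · intro s _
    rw [List.pairwise_map]
    apply List.Pairwise.filter
    refine (PySem.List.pairwise_lt_pyRange_one _ _).imp ?_
    intro x1 x2 h
    rw [Prod.Lex.toLex_lt_toLex]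
    exact Or.inr ⟨rfl, h⟩
  · refine (PySem.List.pairwise_lt_pyRange_one _ _).imp ?_
    intro s1 s2 h12 cc hc dd hd
    simp only [List.mem_map, List.mem_filter] at hc hd
    obtain ⟨x1, -, rfl⟩ := hc
    obtain ⟨x2, -, rfl⟩ := hd
    rw [Prod.Lex.toLex_lt_toLex]
    exact Or.inl h12

theorem pairwiseF (limit : Int) :
    (vhA limit (limit + 1) 1).Pairwise (fun c d => toLex (c.1, c.2.1) < toLex (d.1, d.2.1)) := by
  unfold vhA rowA
  rw [PySem.List.pyRange_one_eq_nil (by omega : (1:Int) ≤ 1)]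
  simp only [List.filter_nil, List.map_nil, List.append_nil]
  rw [List.pairwise_flatMap]
  constructor
  · intro a _
    rw [List.pairwise_map]
    apply List.Pairwise.filter
    refine (PySem.List.pairwise_lt_pyRange_one _ _).imp ?_
    intro b1 b2 h
    rw [Prod.Lex.toLex_lt_toLex]
    exact Or.inr ⟨rfl, h⟩
  · refine (PySem.List.pairwise_lt_pyRange_one _ _).imp ?_
    intro a1 a2 h12 cc hc dd hd
    simp only [List.mem_map, List.mem_filter] at hc hd
    obtain ⟨b1, -, rfl⟩ := hc
    obtain ⟨b2, -, rfl⟩ := hd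
    rw [Prod.Lex.toLex_lt_toLex]
    exact Or.inl h12

theorem permBF (limit : Int) : (bTriples limit).Perm (vhA limit (limit + 1) 1) := by
  have nb : (bTriples limit).Nodup :=
    (pairwiseB limit).imp (fun h he => by subst he; exact lt_irrefl _ h)
  have nf : (vhA limit (limit + 1) 1).Nodup :=
    (pairwiseF limit).imp (fun h he => by subst he; exact lt_irrefl _ h)
  exact (List.perm_ext_iff_of_nodup nb nf).mpr (fun p => (memB limit p).trans (memF limit p).symm)

-- ===== VERDICT (by name: the statement is the Claim_ definition above) =====
theorem generate_visible_houses_spec : Claim_equal_generate_visible_houses := by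
  intro limit _
  show generate_visible_houses limit = generate_visible_houses_alt limit
  by_cases hneg : limit ≤ 0
  · have hA : PySem.List.pyRange 1 (limit + 1) 1 = [] := PySem.List.pyRange_one_eq_nil (by omega)
    have hB : PySem.List.pyRange 2 (2 * limit + 1) 1 = [] := PySem.List.pyRange_one_eq_nil (by omega)
    simp [generate_visible_houses, generate_visible_houses_alt, hA, hB, PySem.List.sorted2]
  · have hfin := outerFold limit limit.toNat 1 ([], PySem.Set.empty) (by omega) (by norm_num)
      (invInit limit)
    show (PySem.List.sorted2
        ((PySem.List.pyRange 1 (limit + 1) 1).foldl (gA limit)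
          (([] : List (Int × Int × Int)), (PySem.Set.empty : PySem.Set (Int × Int)))).1
        (fun c => c.2.2) (fun c => c.1)).map (fun c => (c.1, c.2.1)) = _
    rw [hfin.1, sorted2_eq_sorted_lex,
      PySem.List.sorted_eq_of_perm_of_pairwise_lt _ (bTriples limit) _ (permBF limit)
        (pairwiseB limit), B_eq_map]
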